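-- pv_equiv track=rewrite | github.com/gumaonelove/ege_2021 | Вариант Джобса май/23.py | f
-- ===== SOURCE A (Python) =====
-- def f(a, b):
--     if a == b: return 1
--     if a > b: return 0
--
--     k = f(a+1, b) + f(a*2, b)
--     if a%2==0:
--         k += f(a+1, b)
--     if a%2==1:
--         k += f(a+2, b)
--
--     return k
-- ===== SOURCE B (Python) =====
-- def f(a, b):
--     if a >= b:
--         return 1 if a == b else 0
--     n = b - a + 1
--     ways = [0] * n          # ways[i] = number of paths from a+i to b; unreached slots stay 0
--     ways[n - 1] = 1
--     for x in range(b - 1, a - 1, -1):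
--         k = ways[x + 1 - a]
--         if a <= 2 * x <= b:
--             k += ways[2 * x - a]
--         if x % 2 == 0:
--             k += ways[x + 1 - a]
--         elif x + 2 <= b:
--             k += ways[x + 2 - a]
--         ways[x - a] = k
--     return ways[0]
-- ===== Notes on version B (the rewrite author's own statement) =====
-- stated objective: alternative
-- what changed: Replaced the exponentially branching recursion by a single bottom-up dynamic-programming pass that fills an array of path counts from b down to a.
import Mathlib
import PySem

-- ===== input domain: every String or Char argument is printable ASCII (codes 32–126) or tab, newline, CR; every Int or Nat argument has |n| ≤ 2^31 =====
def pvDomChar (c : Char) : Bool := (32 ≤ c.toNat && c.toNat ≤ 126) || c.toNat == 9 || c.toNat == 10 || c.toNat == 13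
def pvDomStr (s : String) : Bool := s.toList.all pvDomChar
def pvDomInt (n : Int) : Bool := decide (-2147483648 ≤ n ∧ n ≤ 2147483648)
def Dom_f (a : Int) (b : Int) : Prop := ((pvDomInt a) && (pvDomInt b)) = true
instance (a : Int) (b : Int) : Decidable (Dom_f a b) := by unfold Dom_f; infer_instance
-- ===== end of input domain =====

-- B replaces A's branching recursion by one bottom-up DP pass over an array of path counts.

-- ===== PORT A =====
-- fuel makes A's recursion total in Lean; on Pre_f the fuel (b-a).toNat+1 is never exhausted
def fAux : Nat → Int → Int → Int
  | 0, _, _ => 0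
  | fuel+1, a, b =>
    if a = b then 1
    else if a > b then 0
    else
      let k := fAux fuel (a+1) b + fAux fuel (a*2) b
      let k := if PySem.Int.mod a 2 = 0 then k + fAux fuel (a+1) b else k
      let k := if PySem.Int.mod a 2 = 1 then k + fAux fuel (a+2) b else k
      k

def f (a : Int) (b : Int) : Int := fAux ((b - a).toNat + 1) a b

-- ===== PORT B =====
-- one loop-body step of B (the body of 'for x in range(b-1, a-1, -1)').
-- Array.getD/set! are exact here: every index the loop uses is within range, so the
-- Python list indexing never raises and getD/set! read/write exactly that slot.
def fAltStep (a : Int) (b : Int) (ways : Array Int) (x : Int) : Array Int :=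
  let k := ways.getD (x + 1 - a).toNat 0
  let k := if a ≤ 2*x ∧ 2*x ≤ b then k + ways.getD (2*x - a).toNat 0 else k
  let k := if PySem.Int.mod x 2 = 0 then k + ways.getD (x + 1 - a).toNat 0
           else if x + 2 ≤ b then k + ways.getD (x + 2 - a).toNat 0 else k
  ways.set! (x - a).toNat k

def f_alt (a : Int) (b : Int) : Int :=
  if a ≥ b then (if a = b then 1 else 0)
  else
    let n := (b - a + 1).toNat
    let init := (Array.replicate n 0).set! (n - 1) 1
    let ways := (PySem.List.pyRange (b-1) (a-1) (-1)).foldl (fAltStep a b) init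
    ways.getD 0 0

-- ===== PRECONDITION & SPEC =====
-- Pre_f excludes a ≤ 0 < b, where A recurses forever via f(a*2) (Python RecursionError; A never returns)
def Pre_f (a : Int) (b : Int) : Prop := 1 ≤ a ∨ b ≤ a
instance (a : Int) (b : Int) : Decidable (Pre_f a b) := by unfold Pre_f; infer_instance
def pvWitness_f : Int × Int := (1, 6)

def Spec_f (a : Int) (b : Int) (out : Int) : Prop := out = f_alt a b
instance (a : Int) (b : Int) (out : Int) : Decidable (Spec_f a b out) := by unfold Spec_f; infer_instance

-- ===== CLAIM (what is proved, stated in full; the proofs are below) =====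
def Claim_equal_f : Prop := ∀ (a : Int) (b : Int), Dom_f a b → Pre_f a b → Spec_f a b (f a b)

-- ===== LEMMAS AND PROOFS =====

-- reference recurrence (proof-only): the common value both programs compute for 1 ≤ a
def Fref (a b : Int) : Int :=
  if _h : 1 ≤ a ∧ a < b then
    Fref (a+1) b + Fref (a*2) b +
      (if PySem.Int.mod a 2 = 0 then Fref (a+1) b else Fref (a+2) b)
  else if a = b then 1 else 0
termination_by (b - a).toNat
decreasing_by all_goals omega

lemma Fref_rec (a b : Int) (hc : 1 ≤ a ∧ a < b) :
    Fref a b = Fref (a+1) b + Fref (a*2) b +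
      (if PySem.Int.mod a 2 = 0 then Fref (a+1) b else Fref (a+2) b) := by
  conv_lhs => rw [Fref]
  rw [dif_pos hc]

lemma Fref_base (a b : Int) (hc : ¬ (1 ≤ a ∧ a < b)) :
    Fref a b = if a = b then 1 else 0 := by
  conv_lhs => rw [Fref]
  rw [dif_neg hc]

lemma Fref_zero (a b : Int) (h : b < a) : Fref a b = 0 := by
  rw [Fref_base a b (by omega), if_neg (by omega)]

lemma mod2_cases (a : Int) : PySem.Int.mod a 2 = 0 ∨ PySem.Int.mod a 2 = 1 := by
  have h0 := PySem.Int.mod_nonneg a (b := 2) (by omega)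
  have h1 := PySem.Int.mod_lt a (b := 2) (by omega)
  omega

lemma fAux_eq_Fref : ∀ (fuel : Nat) (a b : Int), 1 ≤ a → (b - a).toNat < fuel →
    fAux fuel a b = Fref a b := by
  intro fuel
  induction fuel with
  | zero => intro a b _ h; omega
  | succ n ih =>
    intro a b ha hfuel
    by_cases hab : a = b
    · rw [Fref_base a b (by omega)]
      simp [fAux, hab]
    · by_cases hgt : a > b
      · rw [Fref_base a b (by omega)]
        simp [fAux, hab, hgt]
      · have hc : 1 ≤ a ∧ a < b := ⟨ha, by omega⟩
        rw [Fref_rec a b hc]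
        have e1 : fAux n (a+1) b = Fref (a+1) b := ih _ _ (by omega) (by omega)
        have e2 : fAux n (a*2) b = Fref (a*2) b := ih _ _ (by omega) (by omega)
        have e3 : fAux n (a+2) b = Fref (a+2) b := ih _ _ (by omega) (by omega)
        rcases mod2_cases a with hm | hm <;>
          simp only [fAux, if_neg hab, if_neg hgt, e1, e2, e3, hm] <;>
          norm_num

lemma getD_set (xs : Array Int) (i j : Nat) (v : Int) (_hi : i < xs.size)
    (hj : j < xs.size) :
    (xs.set! i v).getD j 0 = if j = i then v else xs.getD j 0 := by
  simp [Array.getD, hj, Array.getElem_setIfInBounds, eq_comm]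

lemma loop_inv (a b : Int) (ha : 1 ≤ a) (hab : a < b) (x : Int) (w : Array Int)
    (hx1 : a - 1 ≤ x) (hxb : x < b)
    (hsz : w.size = (b - a + 1).toNat)
    (hw : ∀ i : Nat, i < w.size → w.getD i 0 = if x < a + i then Fref (a + i) b else 0) :
    ((PySem.List.pyRange x (a-1) (-1)).foldl (fAltStep a b) w).getD 0 0 = Fref a b := by
  by_cases hend : x ≤ a - 1
  · rw [PySem.List.pyRange_neg_one_eq_nil hend]
    have h0 : (0 : Nat) < w.size := by omega
    rw [List.foldl_nil, hw 0 h0, if_pos (by omega)]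
    norm_num
  · have hax : a - 1 < x := by omega
    rw [PySem.List.pyRange_neg_one_cons hax]
    simp only [List.foldl_cons]
    -- values read by the step
    have g1 : w.getD (x + 1 - a).toNat 0 = Fref (x+1) b := by
      rw [hw _ (by omega), if_pos (by omega)]
      congr 1
      omega
    have hsz' : (fAltStep a b w x).size = (b - a + 1).toNat := by
      simp only [fAltStep]
      simpa using hsz
    have hk : (fAltStep a b w x).getD (x - a).toNat 0 = Fref x b ∧
        ∀ i : Nat, i < w.size → i ≠ (x - a).toNat →
          (fAltStep a b w x).getD i 0 = w.getD i 0 := by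
      constructor
      · simp only [fAltStep]
        rw [getD_set _ _ _ _ (by omega) (by omega), if_pos rfl]
        have g2 : (if a ≤ 2*x ∧ 2*x ≤ b then
            w.getD (x + 1 - a).toNat 0 + w.getD (2*x - a).toNat 0
            else w.getD (x + 1 - a).toNat 0) = Fref (x+1) b + Fref (x*2) b := by
          by_cases h2 : a ≤ 2*x ∧ 2*x ≤ b
          · rw [if_pos h2, g1, hw _ (by omega), if_pos (by omega)]
            congr 2
            omega
          · rw [if_neg h2, g1, Fref_zero (x*2) b (by omega)]
            ring
        rw [g2, g1, Fref_rec x b ⟨by omega, by omega⟩]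
        rcases mod2_cases x with hm | hm
        · rw [hm]
          norm_num
        · rw [hm]
          by_cases h3 : x + 2 ≤ b
          · have g3 : w.getD (x + 2 - a).toNat 0 = Fref (x+2) b := by
              rw [hw _ (by omega), if_pos (by omega)]
              congr 1
              omega
            rw [if_neg (show ¬((1:Int) = (0:Int)) by norm_num),
              if_neg (show ¬((1:Int) = (0:Int)) by norm_num), if_pos h3, g3]
          · rw [if_neg (show ¬((1:Int) = (0:Int)) by norm_num),
              if_neg (show ¬((1:Int) = (0:Int)) by norm_num), if_neg h3,
              Fref_zero (x+2) b (by omega)]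
            ring
      · intro i hi hne
        simp only [fAltStep]
        rw [getD_set _ _ _ _ (by omega) (by simpa using hi), if_neg hne]
    refine loop_inv a b ha hab (x-1) (fAltStep a b w x) (by omega) (by omega) hsz' ?_
    intro i hi
    by_cases hix : i = (x - a).toNat
    · rw [hix, hk.1, if_pos (by omega)]
      congr 1
      omega
    · rw [hk.2 i (by omega) hix, hw i (by omega)]
      have : (x < a + i) ↔ (x - 1 < a + i) := by omega
      rw [if_congr this rfl rfl]
termination_by (x - (a-1)).toNat
decreasing_by omega

lemma f_alt_eq_Fref (a b : Int) (ha : 1 ≤ a) (hab : a < b) : f_alt a b = Fref a b := by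
  show (if a ≥ b then (if a = b then 1 else 0) else _) = Fref a b
  rw [if_neg (by omega)]
  refine loop_inv a b ha hab (b-1) _ (by omega) (by omega) (by simp) ?_
  intro i hi
  have hi' : i < (b - a + 1).toNat := by simpa using hi
  rw [getD_set _ _ _ _ (by simp; omega) (by simpa using hi')]
  by_cases hlast : i = (b - a + 1).toNat - 1
  · rw [if_pos hlast, if_pos (by omega)]
    have hb : a + (i : Int) = b := by omega
    rw [hb, Fref_base b b (by omega), if_pos rfl]
  · rw [if_neg hlast, if_neg (by omega)]
    simp [Array.getD]

-- ===== VERDICT (by name: the statement is the Claim_ definition above) =====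
theorem f_spec : Claim_equal_f := by
  intro a b _ hpre
  unfold Spec_f
  rcases hpre with ha | hba
  · by_cases hab : a < b
    · rw [f_alt_eq_Fref a b ha hab]
      exact fAux_eq_Fref _ a b ha (by omega)
    · rw [f, f_alt, fAux]
      rw [if_pos (by omega : a ≥ b)]
      by_cases he : a = b
      · simp [he]
      · simp [he, (by omega : a > b)]
  · rw [f, f_alt, fAux]
    rw [if_pos (by omega : a ≥ b)]
    by_cases he : a = b
    · simp [he]
    · simp [he, (by omega : a > b)]
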